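-- pv_equiv track=rewrite | github.com/Oscar9610/Oscar9610 | 時空旅行者 劍魔滅世篇/data/weapons/function/get/item_builder.py | skill_info
-- ===== SOURCE A (Python) =====
-- def skill_info(text):
--     temp = []
--     for i in text:
--         i = ',\'[{\"text\":\"\",\"italic\":false},{\"text\":\"'+i
--         if i[-2:] != "&=" and i[-2:] != "&+" and i[-2:] != "&-": i = i+"&="
--         i = i.replace("&=","\",\"color\":\"blue\"},{\"text\":\"")
--         i = i.replace("&+","\",\"color\":\"#2EBD2E\",\"underlined\":true},{\"text\":\"")
--         i = i.replace("&-","\",\"color\":\"red\",\"underlined\":true},{\"text\":\"")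
--         if i[-10:] == ",{\"text\":\"" : i = i[:-10]
--         i = i+']\''
--         temp.append(i)
--     return ''.join(temp)
-- ===== SOURCE B (Python) =====
-- _SEP = {'&=': '","color":"blue"},{"text":"',
--         '&+': '","color":"#2EBD2E","underlined":true},{"text":"',
--         '&-': '","color":"red","underlined":true},{"text":"'}
-- _PREFIX = ',\'[{"text":"","italic":false},{"text":"'
--
--
-- def skill_info(text):
--     # one left-to-right scan per line instead of three full-string replace passes
--     chunks = []
--     for line in text:
--         if line[-2:] not in _SEP:
--             line += '&='
--         chunks.append(_PREFIX)
--         i, n = 0, len(line)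
--         while i < n:
--             sep = _SEP.get(line[i:i + 2])
--             if sep is not None:
--                 i += 2
--                 chunks.append(sep if i < n else sep[:-10])
--             else:
--                 chunks.append(line[i])
--                 i += 1
--         chunks.append("]'")
--     return ''.join(chunks)
-- ===== Notes on version B (the rewrite author's own statement) =====
-- stated objective: alternative
-- what changed: B makes a single left-to-right tokenizing scan per line, emitting the colour separator (or its truncated closing form at end of line) at each marker, instead of A's three sequential full-string replace passes followed by a conditional 10-character tail strip.
import Mathlib
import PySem

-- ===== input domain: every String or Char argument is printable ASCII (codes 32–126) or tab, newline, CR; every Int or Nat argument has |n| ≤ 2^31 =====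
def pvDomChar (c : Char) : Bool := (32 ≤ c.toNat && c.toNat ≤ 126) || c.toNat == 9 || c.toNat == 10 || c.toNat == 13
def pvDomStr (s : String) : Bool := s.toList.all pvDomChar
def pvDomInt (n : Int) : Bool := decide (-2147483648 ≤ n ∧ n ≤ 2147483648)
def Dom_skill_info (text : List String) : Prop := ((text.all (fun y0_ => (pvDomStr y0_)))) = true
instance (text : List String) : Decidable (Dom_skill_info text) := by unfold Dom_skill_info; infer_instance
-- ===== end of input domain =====

-- B replaces A's three sequential full-string replace passes (plus a conditional 10-char tail
-- strip) by a single left-to-right tokenizing scan per line; objective: alternative.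

-- the string literals both Pythons use, as character lists
def pvPre : List Char := [',', '\'', '[', '{', '\"', 't', 'e', 'x', 't', '\"', ':', '\"', '\"', ',', '\"', 'i', 't', 'a', 'l', 'i', 'c', '\"', ':', 'f', 'a', 'l', 's', 'e', '}', ',', '{', '\"', 't', 'e', 'x', 't', '\"', ':', '\"']
def pvR1 : List Char := ['\"', ',', '\"', 'c', 'o', 'l', 'o', 'r', '\"', ':', '\"', 'b', 'l', 'u', 'e', '\"', '}', ',', '{', '\"', 't', 'e', 'x', 't', '\"', ':', '\"']
def pvR2 : List Char := ['\"', ',', '\"', 'c', 'o', 'l', 'o', 'r', '\"', ':', '\"', '#', '2', 'E', 'B', 'D', '2', 'E', '\"', ',', '\"', 'u', 'n', 'd', 'e', 'r', 'l', 'i', 'n', 'e', 'd', '\"', ':', 't', 'r', 'u', 'e', '}', ',', '{', '\"', 't', 'e', 'x', 't', '\"', ':', '\"']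
def pvR3 : List Char := ['\"', ',', '\"', 'c', 'o', 'l', 'o', 'r', '\"', ':', '\"', 'r', 'e', 'd', '\"', ',', '\"', 'u', 'n', 'd', 'e', 'r', 'l', 'i', 'n', 'e', 'd', '\"', ':', 't', 'r', 'u', 'e', '}', ',', '{', '\"', 't', 'e', 'x', 't', '\"', ':', '\"']
def pvTail : List Char := [',', '{', '\"', 't', 'e', 'x', 't', '\"', ':', '\"']
def pvClose : List Char := [']', '\'']

-- ===== PORT A =====
def skill_info_line (i0 : List Char) : List Char :=
  let i := pvPre ++ i0
  let i := if PySem.Chars.slice i (some (-2)) none ≠ ['&', '='] ∧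
              PySem.Chars.slice i (some (-2)) none ≠ ['&', '+'] ∧
              PySem.Chars.slice i (some (-2)) none ≠ ['&', '-'] then i ++ ['&', '='] else i
  let i := PySem.Chars.replace i ['&', '='] pvR1
  let i := PySem.Chars.replace i ['&', '+'] pvR2
  let i := PySem.Chars.replace i ['&', '-'] pvR3
  let i := if PySem.Chars.slice i (some (-10)) none = pvTail
           then PySem.Chars.slice i none (some (-10)) else i
  i ++ pvClose

def skill_info (text : List String) : String :=
  let temp := text.foldl (fun temp i => temp ++ [skill_info_line i.toList]) []
  String.ofList (PySem.Chars.join [] temp)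

-- ===== PORT B =====
-- Source B's while loop: consume a marker (emitting its separator, truncated at end of line) or one char
def pvScanB : List Char → List (List Char)
  | [] => []
  | c :: t =>
    if c = '&' ∧ t.head? = some '=' then
      (if t.tail.isEmpty then PySem.Chars.slice pvR1 none (some (-10)) else pvR1) :: pvScanB t.tail
    else if c = '&' ∧ t.head? = some '+' then
      (if t.tail.isEmpty then PySem.Chars.slice pvR2 none (some (-10)) else pvR2) :: pvScanB t.tail
    else if c = '&' ∧ t.head? = some '-' then
      (if t.tail.isEmpty then PySem.Chars.slice pvR3 none (some (-10)) else pvR3) :: pvScanB t.tail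
    else [c] :: pvScanB t
  termination_by l => l.length
  decreasing_by all_goals (simp [List.length_tail]; try omega)

def skill_info_alt (text : List String) : String :=
  let chunks := text.foldl (fun chunks line0 =>
    let line := line0.toList
    let t2 := PySem.Chars.slice line (some (-2)) none
    let line := if ¬(t2 = ['&', '='] ∨ t2 = ['&', '+'] ∨ t2 = ['&', '-'])
                then line ++ ['&', '='] else line
    chunks ++ [pvPre] ++ pvScanB line ++ [pvClose]) []
  String.ofList chunks.flatten

-- ===== PRECONDITION & SPEC =====
def Spec_skill_info (text : List String) (out : String) : Prop := out = skill_info_alt text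
instance (text : List String) (out : String) : Decidable (Spec_skill_info text out) := by unfold Spec_skill_info; infer_instance

-- ===== CLAIM (what is proved, stated in full; the proofs are below) =====
def Claim_equal_skill_info : Prop := ∀ (text : List String), Dom_skill_info text → Spec_skill_info text (skill_info text)

-- ===== LEMMAS AND PROOFS =====

-- a one-marker scanner: what one Python str.replace pass computes
def pvScan (m2 : Char) (r : List Char) : List Char → List Char
  | [] => []
  | c :: t => if c = '&' ∧ t.head? = some m2 then r ++ pvScan m2 r t.tail else c :: pvScan m2 r t
  termination_by l => l.length
  decreasing_by all_goals (simp [List.length_tail]; try omega)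

-- the simultaneous three-marker scanner: what the composition of the three passes computes
def pvOne : List Char → List Char
  | [] => []
  | c :: t =>
    if c = '&' ∧ t.head? = some '=' then pvR1 ++ pvOne t.tail
    else if c = '&' ∧ t.head? = some '+' then pvR2 ++ pvOne t.tail
    else if c = '&' ∧ t.head? = some '-' then pvR3 ++ pvOne t.tail
    else c :: pvOne t
  termination_by l => l.length
  decreasing_by all_goals (simp [List.length_tail]; try omega)

def pvLastTwo (s : List Char) : List Char := s.drop (s.length - 2)

def pvIsM (s : List Char) : Bool := s == ['&', '='] || s == ['&', '+'] || s == ['&', '-']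

def pvFix (s : List Char) : List Char := if pvIsM (pvLastTwo s) then s else s ++ ['&', '=']

theorem pvIsM_or (l : List Char) :
    pvIsM l = true ↔ (l = ['&', '='] ∨ l = ['&', '+'] ∨ l = ['&', '-']) := by
  simp [pvIsM, or_assoc]


theorem pvScan_go (m2 : Char) (r : List Char) (fuel : Nat) :
    ∀ (l acc : List Char), l.length ≤ fuel →
      PySem.Chars.replace.go ['&', m2] r fuel l acc = acc.reverse ++ pvScan m2 r l := by
  induction fuel with
  | zero =>
    intro l acc h
    have : l = [] := List.length_eq_zero_iff.mp (Nat.le_zero.mp h)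
    subst this
    simp [PySem.Chars.replace.go, pvScan]
  | succ fuel ih =>
    intro l acc h
    cases l with
    | nil => simp [PySem.Chars.replace.go, pvScan]
    | cons c t =>
      rw [PySem.Chars.replace.go]
      cases t with
      | nil =>
        have hpre : List.isPrefixOf ['&', m2] [c] = false := by
          simp [List.isPrefixOf]
        rw [hpre]
        simp only [Bool.false_eq_true, if_false]
        rw [ih [] (c :: acc) (by simp)]
        simp [pvScan]
      | cons d t' =>
        by_cases hc : c = '&' ∧ d = m2
        · have hpre : List.isPrefixOf ['&', m2] (c :: d :: t') = true := by
            simp [List.isPrefixOf, hc.1, hc.2]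
          rw [hpre]
          simp only [if_true]
          have hdrop : List.drop (['&', m2].length) (c :: d :: t') = t' := by simp
          rw [hdrop, ih t' (r.reverse ++ acc) (by simp at h ⊢; omega)]
          rw [pvScan, if_pos (by simp [hc.1, hc.2])]
          simp
        · have hpre : List.isPrefixOf ['&', m2] (c :: d :: t') = false := by
            simp [List.isPrefixOf]
            intro h1 h2; exact hc ⟨h1.symm, h2.symm⟩
          rw [hpre]
          simp only [Bool.false_eq_true, if_false]
          rw [ih (d :: t') (c :: acc) (by simp at h ⊢; omega)]
          have : pvScan m2 r (c :: d :: t') = c :: pvScan m2 r (d :: t') := by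
            rw [pvScan]
            rw [if_neg]
            simp only [List.head?_cons, Option.some.injEq]
            intro hh; exact hc ⟨hh.1, hh.2⟩
          rw [this]
          simp

theorem replace_eq_pvScan (m2 : Char) (r s : List Char) :
    PySem.Chars.replace s ['&', m2] r = pvScan m2 r s := by
  unfold PySem.Chars.replace
  simp only [List.isEmpty_cons, Bool.false_eq_true, if_false]
  rw [pvScan_go m2 r s.length s [] le_rfl]
  simp

theorem pvScan_append (m2 : Char) (r : List Char) (x : List Char) (y : List Char)
    (h : ∀ c ∈ x, c ≠ '&') : pvScan m2 r (x ++ y) = x ++ pvScan m2 r y := by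
  induction x with
  | nil => simp
  | cons a x' ih =>
    have ha : a ≠ '&' := h a (List.mem_cons_self)
    rw [List.cons_append, pvScan, if_neg (by intro hh; exact ha hh.1)]
    rw [ih (fun c hc => h c (List.mem_cons_of_mem a hc))]
    simp

theorem head?_pvScan (m2 : Char) (r : List Char) (hr : r.head? = some '"') (t : List Char) :
    (pvScan m2 r t).head? = t.head? ∨ (pvScan m2 r t).head? = some '"' := by
  cases t with
  | nil => left; rw [pvScan]
  | cons c t' =>
    rw [pvScan]
    by_cases hc : c = '&' ∧ t'.head? = some m2
    · rw [if_pos hc]; right; rw [List.head?_append, hr]; rfl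
    · rw [if_neg hc]; left; rfl

theorem ampAll (r : List Char) (hr : (r.all (fun c => c != '&')) = true) : ∀ c ∈ r, c ≠ '&' := by
  rw [List.all_eq_true] at hr
  intro c hc
  simpa using hr c hc
theorem ampR1 : ∀ c ∈ pvR1, c ≠ '&' := ampAll _ (by rfl)
theorem ampR2 : ∀ c ∈ pvR2, c ≠ '&' := ampAll _ (by rfl)
theorem ampPre : ∀ c ∈ pvPre, c ≠ '&' := ampAll _ (by rfl)

theorem comp123 (s : List Char) :
    pvScan '-' pvR3 (pvScan '+' pvR2 (pvScan '=' pvR1 s)) = pvOne s := by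
  fun_induction pvOne s with
  | case1 => rw [pvScan, pvScan, pvScan]
  | case2 c t h ih =>
    rw [pvScan, if_pos h]
    rw [pvScan_append _ _ pvR1 _ ampR1, pvScan_append _ _ pvR1 _ ampR1, ih]
  | case3 c t h1 h2 ih =>
    obtain ⟨rfl, hhd⟩ := h2
    cases t with
    | nil => simp at hhd
    | cons d t' =>
      simp only [List.head?_cons, Option.some.injEq] at hhd
      subst hhd
      have e1 : pvScan '=' pvR1 ('&' :: '+' :: t') = '&' :: '+' :: pvScan '=' pvR1 t' := by
        rw [pvScan, if_neg h1, pvScan, if_neg (by simp)]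
      have e2 : pvScan '+' pvR2 ('&' :: '+' :: pvScan '=' pvR1 t') =
          pvR2 ++ pvScan '+' pvR2 (pvScan '=' pvR1 t') := by
        rw [pvScan, if_pos ⟨rfl, rfl⟩]; simp
      rw [e1, e2, pvScan_append _ _ pvR2 _ ampR2]
      simp only [List.tail_cons] at ih ⊢
      rw [ih]
  | case4 c t h1 h2 h3 ih =>
    obtain ⟨rfl, hhd⟩ := h3
    cases t with
    | nil => simp at hhd
    | cons d t' =>
      simp only [List.head?_cons, Option.some.injEq] at hhd
      subst hhd
      have e1 : pvScan '=' pvR1 ('&' :: '-' :: t') = '&' :: '-' :: pvScan '=' pvR1 t' := by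
        rw [pvScan, if_neg h1, pvScan, if_neg (by simp)]
      have e2 : pvScan '+' pvR2 ('&' :: '-' :: pvScan '=' pvR1 t') =
          '&' :: '-' :: pvScan '+' pvR2 (pvScan '=' pvR1 t') := by
        rw [pvScan, if_neg (by simp), pvScan, if_neg (by simp)]
      have e3 : pvScan '-' pvR3 ('&' :: '-' :: pvScan '+' pvR2 (pvScan '=' pvR1 t')) =
          pvR3 ++ pvScan '-' pvR3 (pvScan '+' pvR2 (pvScan '=' pvR1 t')) := by
        rw [pvScan, if_pos ⟨rfl, rfl⟩]; simp
      rw [e1, e2, e3]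
      simp only [List.tail_cons] at ih ⊢
      rw [ih]
  | case5 c t h1 h2 h3 ih =>
    have e1 : pvScan '=' pvR1 (c :: t) = c :: pvScan '=' pvR1 t := by
      rw [pvScan, if_neg h1]
    have e2 : pvScan '+' pvR2 (c :: pvScan '=' pvR1 t) = c :: pvScan '+' pvR2 (pvScan '=' pvR1 t) := by
      rw [pvScan, if_neg ?_]
      rintro ⟨rfl, hh⟩
      rcases head?_pvScan '=' pvR1 (by decide) t with he | he <;> rw [he] at hh
      · exact h2 ⟨rfl, hh⟩
      · simp at hh
    have e3 : pvScan '-' pvR3 (c :: pvScan '+' pvR2 (pvScan '=' pvR1 t)) =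
        c :: pvScan '-' pvR3 (pvScan '+' pvR2 (pvScan '=' pvR1 t)) := by
      rw [pvScan, if_neg ?_]
      rintro ⟨rfl, hh⟩
      rcases head?_pvScan '+' pvR2 (by decide) (pvScan '=' pvR1 t) with he | he <;> rw [he] at hh
      · rcases head?_pvScan '=' pvR1 (by decide) t with he2 | he2 <;> rw [he2] at hh
        · exact h3 ⟨rfl, hh⟩
        · simp at hh
      · simp at hh
    rw [e1, e2, e3, ih]

theorem pvLastTwo_cons (a : Char) (t : List Char) (h : 2 ≤ t.length) :
    pvLastTwo (a :: t) = pvLastTwo t := by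
  unfold pvLastTwo
  have h1 : (a :: t).length - 2 = (t.length - 2) + 1 := by simp; omega
  rw [h1, List.drop_succ_cons]

theorem pvLastTwo_append (u s : List Char) (h : 2 ≤ s.length) :
    pvLastTwo (u ++ s) = pvLastTwo s := by
  induction u with
  | nil => simp
  | cons a u' ih =>
    rw [List.cons_append, pvLastTwo_cons a (u' ++ s) (by simp; omega), ih]

theorem pvIsM_pre (s : List Char) : pvIsM (pvLastTwo (pvPre ++ s)) = pvIsM (pvLastTwo s) := by
  match s with
  | [] =>
    have : pvPre ++ ([] : List Char) = pvPre := by simp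
    rw [this]; decide
  | [c] =>
    have hp : pvPre ++ [c] = [',', '\'', '[', '{', '\"', 't', 'e', 'x', 't', '\"', ':', '\"', '\"', ',', '\"', 'i', 't', 'a', 'l', 'i', 'c', '\"', ':', 'f', 'a', 'l', 's', 'e', '}', ',', '{', '\"', 't', 'e', 'x', 't', '\"', ':'] ++ ['\"', c] := rfl
    rw [hp, pvLastTwo_append _ _ (by simp)]
    have h2 : pvLastTwo ['\"', c] = ['\"', c] := by unfold pvLastTwo; simp
    have h3 : pvLastTwo [c] = [c] := by unfold pvLastTwo; simp
    rw [h2, h3]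
    simp [pvIsM]
  | a :: b :: t =>
    rw [pvLastTwo_append _ _ (by simp)]

-- when the pair (x, y) starts no marker, pvIsM of the last two chars descends past the head
theorem pvIsM_step (c : Char) (t : List Char)
    (h1 : ¬(c = '&' ∧ t.head? = some '=')) (h2 : ¬(c = '&' ∧ t.head? = some '+'))
    (h3 : ¬(c = '&' ∧ t.head? = some '-')) (h : pvIsM (pvLastTwo (c :: t)) = true) :
    pvIsM (pvLastTwo t) = true := by
  match t with
  | [] => simp [pvLastTwo, pvIsM] at h
  | [d] =>
    have he : pvLastTwo [c, d] = [c, d] := by unfold pvLastTwo; simp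
    rw [he] at h
    rw [pvIsM_or] at h
    rcases h with h | h | h <;> simp only [List.cons.injEq, and_true] at h
    · obtain ⟨rfl, rfl⟩ := h
      exact absurd ⟨rfl, by simp⟩ h1
    · obtain ⟨rfl, rfl⟩ := h
      exact absurd ⟨rfl, by simp⟩ h2
    · obtain ⟨rfl, rfl⟩ := h
      exact absurd ⟨rfl, by simp⟩ h3
  | a :: b :: t' =>
    rw [pvLastTwo_cons c (a :: b :: t') (by simp)] at h
    exact h

-- peeling a marker 'x y' (y ≠ '&') off the front keeps "ends with a marker" for a nonempty rest
theorem pvIsM_peel (x y : Char) (hy : y ≠ '&') :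
    ∀ (t : List Char), t ≠ [] → pvIsM (pvLastTwo (x :: y :: t)) = true →
      pvIsM (pvLastTwo t) = true := by
  intro t ht h
  match t with
  | [e] =>
    have he : pvLastTwo (x :: y :: [e]) = [y, e] := by
      rw [pvLastTwo_cons x _ (by simp)]; unfold pvLastTwo; simp
    rw [he] at h
    rw [pvIsM_or] at h
    rcases h with h | h | h <;> simp only [List.cons.injEq, and_true] at h <;>
      exact absurd h.1 hy
  | e :: f :: v =>
    rw [pvLastTwo_cons x _ (by simp), pvLastTwo_cons y _ (by simp)] at h
    exact h

theorem scan_one (s : List Char) (h : pvIsM (pvLastTwo s) = true) :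
    pvOne s = (pvScanB s).flatten ++ pvTail := by
  fun_induction pvScanB s with
  | case1 => simp [pvLastTwo, pvIsM] at h
  | case2 c t h1 ih =>
    obtain ⟨rfl, hhd⟩ := h1
    cases t with
    | nil => simp at hhd
    | cons d t' =>
      simp only [List.head?_cons, Option.some.injEq] at hhd
      subst hhd
      rw [pvOne, if_pos ⟨rfl, rfl⟩]
      simp only [List.tail_cons] at ih ⊢
      cases t' with
      | nil =>
        have h0 : pvOne ([] : List Char) = [] := by rw [pvOne]
        have h0' : pvScanB ([] : List Char) = [] := by rw [pvScanB]
        have hsl : PySem.Chars.slice pvR1 none (some (-10)) = List.take (pvR1.length - 10) pvR1 := by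
          rw [PySem.Chars.slice_eq_listSlice, PySem.List.slice_to_neg_ofNat _ 10 (by omega)]
        rw [h0, h0', hsl]
        decide
      | cons e u =>
        rw [ih (pvIsM_peel '&' '=' (by decide) (e :: u) (by simp) h)]
        simp
  | case3 c t h1 h2 ih =>
    obtain ⟨rfl, hhd⟩ := h2
    cases t with
    | nil => simp at hhd
    | cons d t' =>
      simp only [List.head?_cons, Option.some.injEq] at hhd
      subst hhd
      rw [pvOne, if_neg h1, if_pos ⟨rfl, rfl⟩]
      simp only [List.tail_cons] at ih ⊢
      cases t' with
      | nil =>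
        have h0 : pvOne ([] : List Char) = [] := by rw [pvOne]
        have h0' : pvScanB ([] : List Char) = [] := by rw [pvScanB]
        have hsl : PySem.Chars.slice pvR2 none (some (-10)) = List.take (pvR2.length - 10) pvR2 := by
          rw [PySem.Chars.slice_eq_listSlice, PySem.List.slice_to_neg_ofNat _ 10 (by omega)]
        rw [h0, h0', hsl]
        decide
      | cons e u =>
        rw [ih (pvIsM_peel '&' '+' (by decide) (e :: u) (by simp) h)]
        simp
  | case4 c t h1 h2 h3 ih =>
    obtain ⟨rfl, hhd⟩ := h3
    cases t with
    | nil => simp at hhd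
    | cons d t' =>
      simp only [List.head?_cons, Option.some.injEq] at hhd
      subst hhd
      rw [pvOne, if_neg h1, if_neg h2, if_pos ⟨rfl, rfl⟩]
      simp only [List.tail_cons] at ih ⊢
      cases t' with
      | nil =>
        have h0 : pvOne ([] : List Char) = [] := by rw [pvOne]
        have h0' : pvScanB ([] : List Char) = [] := by rw [pvScanB]
        have hsl : PySem.Chars.slice pvR3 none (some (-10)) = List.take (pvR3.length - 10) pvR3 := by
          rw [PySem.Chars.slice_eq_listSlice, PySem.List.slice_to_neg_ofNat _ 10 (by omega)]
        rw [h0, h0', hsl]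
        decide
      | cons e u =>
        rw [ih (pvIsM_peel '&' '-' (by decide) (e :: u) (by simp) h)]
        simp
  | case5 c t h1 h2 h3 ih =>
    rw [pvOne, if_neg h1, if_neg h2, if_neg h3, ih (pvIsM_step c t h1 h2 h3 h)]
    simp

theorem pvOne_pre (x : List Char) : pvOne (pvPre ++ x) = pvPre ++ pvOne x := by
  rw [← comp123, pvScan_append _ _ _ _ ampPre, pvScan_append _ _ _ _ ampPre,
    pvScan_append _ _ _ _ ampPre, comp123]

theorem slice_lastTwo (l : List Char) :
    PySem.Chars.slice l (some (-2)) none = pvLastTwo l := by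
  rw [PySem.Chars.slice_eq_listSlice, PySem.List.slice_from_neg_ofNat l 2 (by omega)]
  rfl

theorem pvIsM_cond (l : List Char) :
    (l ≠ ['&', '='] ∧ l ≠ ['&', '+'] ∧ l ≠ ['&', '-']) ↔ pvIsM l = false := by
  simp [pvIsM, and_assoc]

set_option maxHeartbeats 1000000 in
theorem lineA_eq (s : List Char) :
    skill_info_line s = pvPre ++ (pvScanB (pvFix s)).flatten ++ pvClose := by
  have hfix : pvIsM (pvLastTwo (pvFix s)) = true := by
    unfold pvFix
    by_cases hm : pvIsM (pvLastTwo s) = true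
    · rw [if_pos hm]; exact hm
    · rw [if_neg hm]
      rw [pvLastTwo_append s ['&', '='] (by simp)]
      decide
  have hone : PySem.Chars.replace (PySem.Chars.replace (PySem.Chars.replace
      (pvPre ++ pvFix s) ['&', '='] pvR1) ['&', '+'] pvR2) ['&', '-'] pvR3 =
      (pvPre ++ (pvScanB (pvFix s)).flatten) ++ pvTail := by
    rw [replace_eq_pvScan, replace_eq_pvScan, replace_eq_pvScan, comp123, pvOne_pre,
      scan_one _ hfix]
    simp
  unfold skill_info_line
  simp only [slice_lastTwo, ne_eq]
  have hsel : (if ¬pvLastTwo (pvPre ++ s) = ['&', '='] ∧ ¬pvLastTwo (pvPre ++ s) = ['&', '+'] ∧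
      ¬pvLastTwo (pvPre ++ s) = ['&', '-'] then (pvPre ++ s) ++ ['&', '='] else pvPre ++ s) =
      pvPre ++ pvFix s := by
    by_cases hm : pvIsM (pvLastTwo s) = true
    · rw [if_neg (by
        intro hA
        have hf := (pvIsM_cond _).mp hA
        rw [pvIsM_pre s] at hf
        simp [hm] at hf)]
      unfold pvFix
      rw [if_pos hm]
    · rw [if_pos (by
        apply (pvIsM_cond _).mpr
        rw [pvIsM_pre s]
        simpa using hm)]
      unfold pvFix
      rw [if_neg hm, List.append_assoc]
  rw [hsel, hone]
  have hlen : ((pvPre ++ (pvScanB (pvFix s)).flatten) ++ pvTail).length - 10 =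
      (pvPre ++ (pvScanB (pvFix s)).flatten).length := by
    simp [pvTail]
    omega
  rw [PySem.Chars.slice_eq_listSlice, PySem.List.slice_from_neg_ofNat _ 10 (by omega), hlen,
    List.drop_left, if_pos rfl]
  rw [PySem.Chars.slice_eq_listSlice, PySem.List.slice_to_neg_ofNat _ 10 (by omega), hlen,
    List.take_left]

theorem foldA (l : List String) :
    ∀ acc, l.foldl (fun temp i => temp ++ [skill_info_line i.toList]) acc =
      acc ++ l.map (fun i => skill_info_line i.toList) := by
  induction l with
  | nil => intro acc; simp
  | cons s rest ih => intro acc; rw [List.foldl_cons, ih]; simp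

theorem foldB (l : List String) :
    ∀ acc, l.foldl (fun chunks line0 =>
        let line := line0.toList
        let t2 := PySem.Chars.slice line (some (-2)) none
        let line := if ¬(t2 = ['&', '='] ∨ t2 = ['&', '+'] ∨ t2 = ['&', '-'])
                    then line ++ ['&', '='] else line
        chunks ++ [pvPre] ++ pvScanB line ++ [pvClose]) acc =
      acc ++ l.flatMap (fun line0 => [pvPre] ++ pvScanB (pvFix line0.toList) ++ [pvClose]) := by
  induction l with
  | nil => intro acc; simp
  | cons s rest ih =>
    intro acc
    rw [List.foldl_cons, ih]
    have hb : (if ¬(PySem.Chars.slice s.toList (some (-2)) none = ['&', '='] ∨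
          PySem.Chars.slice s.toList (some (-2)) none = ['&', '+'] ∨
          PySem.Chars.slice s.toList (some (-2)) none = ['&', '-'])
        then s.toList ++ ['&', '='] else s.toList) = pvFix s.toList := by
      rw [slice_lastTwo]
      unfold pvFix
      by_cases hm : pvIsM (pvLastTwo s.toList) = true
      · rw [if_neg (not_not_intro ((pvIsM_or _).mp hm)), if_pos hm]
      · rw [if_pos (fun h => hm ((pvIsM_or _).mpr h)), if_neg hm]
    simp only [hb]
    simp

theorem join_nil_sep (ps : List (List Char)) : PySem.Chars.join [] ps = ps.flatten := by
  unfold PySem.Chars.join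
  induction ps with
  | nil => rfl
  | cons a t ih =>
    cases t with
    | nil => simp [List.intercalate]
    | cons b t' =>
      simp [List.intercalate, List.intersperse] at ih ⊢
      exact ih

-- ===== VERDICT (by name: the statement is the Claim_ definition above) =====
theorem skill_info_spec : Claim_equal_skill_info := by
  intro text hdom
  clear hdom
  unfold Spec_skill_info skill_info skill_info_alt
  rw [foldA, foldB]
  simp only [List.nil_append]
  rw [join_nil_sep]
  congr 1
  induction text with
  | nil => simp
  | cons s rest ih =>
    rw [List.map_cons, List.flatMap_cons, List.flatten_cons, ih, lineA_eq]
    simp
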